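-- pv_equiv track=rewrite | github.com/evangoforth19/Monte-Carlo-Simulation | General_Initialization (1).py | hitter_facing_relief
-- ===== SOURCE A (Python) =====
-- def hitter_facing_relief(simulated_bf, most_recent_spot, bp_bf_sim):
--     """
--     Calculate how many times McNeil will face relief pitchers.
--
--     Parameters:
--         simulated_bf (int): Number of batters faced by starting pitcher.
--         mcneil_pa_vs_sp (int): McNeil's lineup spot (1 to 9).
--         relief_bfd (int): Number of batters faced by relief pitchers.
--
--     Returns:
--         int: Number of times McNeil faces relief pitchers.
--     """
--
--     # Calculate next batter spot after starting pitcher's BF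
--     next_batter_spot = ((simulated_bf) % 9) + 1  # lineup spots 1-9
--
--     count = 0
--     for i in range(bp_bf_sim):
--         current_spot = ((next_batter_spot + i - 1) % 9) + 1
--         if current_spot == most_recent_spot:
--             count += 1
--
--     return count
-- ===== SOURCE B (Python) =====
-- def hitter_facing_relief(simulated_bf, most_recent_spot, bp_bf_sim):
--     """Closed-form count: spots cycle mod 9, so matches form an arithmetic
--     progression with step 9; count it directly instead of looping."""
--     if bp_bf_sim <= 0 or not (1 <= most_recent_spot <= 9):
--         return 0
--     # first i >= 0 at which the current spot equals most_recent_spot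
--     first = (most_recent_spot - 1 - simulated_bf) % 9
--     if first >= bp_bf_sim:
--         return 0
--     return (bp_bf_sim - 1 - first) // 9 + 1
-- ===== Notes on version B (the rewrite author's own statement) =====
-- stated objective: faster
-- what changed: Replaces the O(bp_bf_sim) loop over every relief batter with an O(1) closed-form count of the arithmetic progression of matching indices mod 9.
import Mathlib
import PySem

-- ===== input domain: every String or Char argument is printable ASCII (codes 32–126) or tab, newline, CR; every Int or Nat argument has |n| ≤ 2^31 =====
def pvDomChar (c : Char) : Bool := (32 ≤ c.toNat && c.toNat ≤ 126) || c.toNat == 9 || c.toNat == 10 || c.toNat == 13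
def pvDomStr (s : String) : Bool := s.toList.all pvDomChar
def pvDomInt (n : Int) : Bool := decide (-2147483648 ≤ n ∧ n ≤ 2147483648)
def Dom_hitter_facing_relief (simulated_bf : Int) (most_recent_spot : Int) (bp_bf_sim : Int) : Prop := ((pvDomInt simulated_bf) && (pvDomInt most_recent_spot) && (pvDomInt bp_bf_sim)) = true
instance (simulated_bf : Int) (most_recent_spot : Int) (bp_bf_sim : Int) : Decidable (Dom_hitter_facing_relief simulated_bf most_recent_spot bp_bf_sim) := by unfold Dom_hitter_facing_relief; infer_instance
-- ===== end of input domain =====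

-- B replaces A's O(bp_bf_sim) loop by an O(1) closed-form count of the
-- arithmetic progression (step 9) of matching indices (objective: faster).

-- ===== PORT A =====
def hitter_facing_relief (simulated_bf : Int) (most_recent_spot : Int) (bp_bf_sim : Int) : Int :=
  let next_batter_spot := PySem.Int.mod simulated_bf 9 + 1
  (PySem.List.pyRange 0 bp_bf_sim 1).foldl
    (fun count i =>
      if PySem.Int.mod (next_batter_spot + i - 1) 9 + 1 = most_recent_spot then count + 1 else count)
    0

-- ===== PORT B =====
def hitter_facing_relief_alt (simulated_bf : Int) (most_recent_spot : Int) (bp_bf_sim : Int) : Int :=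
  if bp_bf_sim ≤ 0 ∨ ¬ (1 ≤ most_recent_spot ∧ most_recent_spot ≤ 9) then 0
  else
    let first := PySem.Int.mod (most_recent_spot - 1 - simulated_bf) 9
    if first ≥ bp_bf_sim then 0
    else PySem.Int.floordiv (bp_bf_sim - 1 - first) 9 + 1

-- ===== PRECONDITION & SPEC =====
def Spec_hitter_facing_relief (simulated_bf : Int) (most_recent_spot : Int) (bp_bf_sim : Int) (out : Int) : Prop := out = hitter_facing_relief_alt simulated_bf most_recent_spot bp_bf_sim
instance (simulated_bf : Int) (most_recent_spot : Int) (bp_bf_sim : Int) (out : Int) : Decidable (Spec_hitter_facing_relief simulated_bf most_recent_spot bp_bf_sim out) := by unfold Spec_hitter_facing_relief; infer_instance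

-- ===== CLAIM (what is proved, stated in full; the proofs are below) =====
def Claim_equal_hitter_facing_relief : Prop := ∀ (simulated_bf : Int) (most_recent_spot : Int) (bp_bf_sim : Int), Dom_hitter_facing_relief simulated_bf most_recent_spot bp_bf_sim → Spec_hitter_facing_relief simulated_bf most_recent_spot bp_bf_sim (hitter_facing_relief simulated_bf most_recent_spot bp_bf_sim)

-- ===== LEMMAS AND PROOFS =====

-- B's step recurrence: extending the range by one batter adds 1 exactly when
-- that batter's lineup spot matches.
lemma alt_step (s m : Int) (n : Nat) :
    hitter_facing_relief_alt s m ((n : Int) + 1) =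
      hitter_facing_relief_alt s m (n : Int) +
        (if PySem.Int.mod (PySem.Int.mod s 9 + 1 + (n : Int) - 1) 9 + 1 = m then 1 else 0) := by
  unfold hitter_facing_relief_alt
  simp only [PySem.Int.mod_eq_emod_of_pos (show (0:Int) < 9 by norm_num),
      PySem.Int.floordiv_eq_ediv_of_pos (show (0:Int) < 9 by norm_num)]
  split_ifs <;> omega

-- A's loop over range(n) equals B's closed form, by induction on n.
lemma loop_eq_alt (s m : Int) (n : Nat) :
    (PySem.List.pyRange 0 (n : Int) 1).foldl
      (fun count i =>
        if PySem.Int.mod (PySem.Int.mod s 9 + 1 + i - 1) 9 + 1 = m then count + 1 else count)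
      0 = hitter_facing_relief_alt s m (n : Int) := by
  induction n with
  | zero =>
      rw [PySem.List.pyRange_one_eq_nil (by norm_num)]
      unfold hitter_facing_relief_alt
      simp
  | succ k ih =>
      have h : ((k : Int) + 1) = ((k : Int) + 1) := rfl
      rw [show ((k + 1 : Nat) : Int) = (k : Int) + 1 by push_cast; ring,
          PySem.List.pyRange_one_succ_right (by positivity),
          List.foldl_append, alt_step]
      simp only [List.foldl]
      rw [ih]
      split_ifs <;> simp

theorem hitter_facing_relief_spec : Claim_equal_hitter_facing_relief := by
  intro s m b _
  unfold Spec_hitter_facing_relief hitter_facing_relief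
  by_cases hb : b ≤ 0
  · rw [PySem.List.pyRange_one_eq_nil hb]
    unfold hitter_facing_relief_alt
    simp [hb]
  · have : b = ((b.toNat : Nat) : Int) := by omega
    rw [this]
    exact loop_eq_alt s m b.toNat

-- ===== VERDICT (by name: the statement is the Claim_ definition above) =====
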